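-- pv_equiv track=rewrite | github.com/ankit6686510/Hackathon | enterprise_data_ingestion.py | _is_issue_thread
-- ===== SOURCE A (Python) =====
-- from typing import List, Dict, Any, Optional
--
-- def _is_issue_thread(thread: List[Dict]) -> bool:
--     """Determine if a Slack thread represents an issue resolution"""
--     if len(thread) < 2:
--         return False
--
--     # Look for keywords that indicate issue resolution
--     issue_keywords = ["error", "issue", "problem", "bug", "failed", "timeout", "exception"]
--     resolution_keywords = ["fixed", "resolved", "solution", "workaround", "solved"]
--
--     thread_text = " ".join([msg.get("text", "") for msg in thread]).lower()
--
--     has_issue = any(keyword in thread_text for keyword in issue_keywords)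
--     has_resolution = any(keyword in thread_text for keyword in resolution_keywords)
--
--     return has_issue and has_resolution
-- ===== SOURCE B (Python) =====
-- def _is_issue_thread(thread):
--     """Determine if a Slack thread represents an issue resolution"""
--     if len(thread) < 2:
--         return False
--
--     issue_keywords = ["error", "issue", "problem", "bug", "failed", "timeout", "exception"]
--     resolution_keywords = ["fixed", "resolved", "solution", "workaround", "solved"]
--
--     has_issue = False
--     has_resolution = False
--     for msg in thread:
--         text = msg.get("text", "").lower()
--         if not has_issue and any(k in text for k in issue_keywords):
--             has_issue = True
--         if not has_resolution and any(k in text for k in resolution_keywords):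
--             has_resolution = True
--         if has_issue and has_resolution:
--             return True
--     return False
-- ===== Notes on version B (the rewrite author's own statement) =====
-- stated objective: alternative
-- what changed: Replaces A's build-one-joined-lowercased-string-then-scan-it-twice with a single streaming pass over the messages that lowercases each message's text individually, maintains has_issue/has_resolution flags, and returns True early once both are set.
import Mathlib
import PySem

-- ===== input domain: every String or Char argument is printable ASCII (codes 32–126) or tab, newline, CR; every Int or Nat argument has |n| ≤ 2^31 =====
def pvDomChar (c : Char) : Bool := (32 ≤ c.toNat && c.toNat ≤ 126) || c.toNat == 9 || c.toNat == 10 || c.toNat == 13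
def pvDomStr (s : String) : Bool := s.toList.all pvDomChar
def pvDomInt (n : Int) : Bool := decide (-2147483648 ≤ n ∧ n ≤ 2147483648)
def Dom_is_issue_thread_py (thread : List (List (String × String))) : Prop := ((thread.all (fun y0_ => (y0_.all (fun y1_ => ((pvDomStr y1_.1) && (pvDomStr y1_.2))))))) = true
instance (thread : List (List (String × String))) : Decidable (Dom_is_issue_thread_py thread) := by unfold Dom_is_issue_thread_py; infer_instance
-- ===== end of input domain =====

-- B replaces A's join-the-whole-thread-then-scan-twice with one streaming pass over the
-- messages maintaining two booleans and returning early once both are set (objective: alternative).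

-- keyword lists shared by both Pythons (same literals in Source A and Source B)
def pvIssueKeywords : List String := ["error", "issue", "problem", "bug", "failed", "timeout", "exception"]
def pvResolutionKeywords : List String := ["fixed", "resolved", "solution", "workaround", "solved"]

-- ===== PORT A =====
def is_issue_thread_py (thread : List (List (String × String))) : Bool :=
  if thread.length < 2 then false
  else
    let thread_text := PySem.Str.lower (PySem.Str.join " " (thread.map (fun msg => PySem.Dict.getD (PySem.Dict.ofList msg) "text" "")))
    let has_issue := pvIssueKeywords.any (fun k => PySem.Str.isIn k thread_text)
    let has_resolution := pvResolutionKeywords.any (fun k => PySem.Str.isIn k thread_text)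
    has_issue && has_resolution

-- ===== PORT B =====
-- the 'for msg in thread' loop of Source B, with its two flags and the early 'return True'
def pvAltLoop : List (List (String × String)) → Bool → Bool → Bool
  | [], _, _ => false
  | msg :: rest, has_issue, has_resolution =>
    let text := PySem.Str.lower (PySem.Dict.getD (PySem.Dict.ofList msg) "text" "")
    let has_issue := if !has_issue && pvIssueKeywords.any (fun k => PySem.Str.isIn k text) then true else has_issue
    let has_resolution := if !has_resolution && pvResolutionKeywords.any (fun k => PySem.Str.isIn k text) then true else has_resolution
    if has_issue && has_resolution then true
    else pvAltLoop rest has_issue has_resolution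

def is_issue_thread_py_alt (thread : List (List (String × String))) : Bool :=
  if thread.length < 2 then false
  else pvAltLoop thread false false

-- ===== PRECONDITION & SPEC =====
def Spec_is_issue_thread_py (thread : List (List (String × String))) (out : Bool) : Prop := out = is_issue_thread_py_alt thread
instance (thread : List (List (String × String))) (out : Bool) : Decidable (Spec_is_issue_thread_py thread out) := by unfold Spec_is_issue_thread_py; infer_instance

-- ===== CLAIM (what is proved, stated in full; the proofs are below) =====
def Claim_equal_is_issue_thread_py : Prop := ∀ (thread : List (List (String × String))), Dom_is_issue_thread_py thread → Spec_is_issue_thread_py thread (is_issue_thread_py thread)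

-- ===== LEMMAS AND PROOFS =====

-- per-message hit tests of Source B, used only in the proofs
def pvHitI (msg : List (String × String)) : Bool :=
  pvIssueKeywords.any (fun k => PySem.Str.isIn k (PySem.Str.lower (PySem.Dict.getD (PySem.Dict.ofList msg) "text" "")))
def pvHitR (msg : List (String × String)) : Bool :=
  pvResolutionKeywords.any (fun k => PySem.Str.isIn k (PySem.Str.lower (PySem.Dict.getD (PySem.Dict.ofList msg) "text" "")))

-- a list not containing c is a prefix of a ++ c :: b iff it is a prefix of a
theorem pv_prefix_mid (sub : List Char) (c : Char) (hc : c ∉ sub) :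
    ∀ a b : List Char, (sub <+: (a ++ c :: b)) ↔ sub <+: a := by
  induction sub with
  | nil => intro a b; simp
  | cons s ss ih =>
    intro a b
    have hsc : s ≠ c := fun e => hc (e ▸ List.mem_cons_self ..)
    have hcss : c ∉ ss := fun h => hc (List.mem_cons_of_mem _ h)
    cases a with
    | nil => simp [List.cons_prefix_cons, hsc]
    | cons x a' => simp [List.cons_prefix_cons, ih hcss a' b]

-- a nonempty list not containing c is an infix of a ++ c :: b iff it is an infix of a or of b
theorem pv_infix_mid (sub : List Char) (c : Char) (hc : c ∉ sub) (hne : sub ≠ []) :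
    ∀ a b : List Char, (sub <:+: (a ++ c :: b)) ↔ (sub <:+: a ∨ sub <:+: b) := by
  intro a b
  induction a with
  | nil =>
    simp only [List.nil_append, List.infix_cons_iff]
    rw [show (sub <+: c :: b ↔ sub <+: ([] : List Char)) from pv_prefix_mid sub c hc [] b]
    simp [hne]
  | cons x a' ih =>
    simp only [List.cons_append, List.infix_cons_iff] at *
    rw [show (sub <+: x :: (a' ++ c :: b) ↔ sub <+: x :: a') from pv_prefix_mid sub c hc (x :: a') b, ih]
    tauto

-- lowercasing commutes with joining on " "
theorem pv_lower_join : ∀ ls : List (List Char),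
    PySem.Chars.lower (PySem.Chars.join [' '] ls) = PySem.Chars.join [' '] (ls.map PySem.Chars.lower) := by
  intro ls
  induction ls with
  | nil => simp [PySem.Chars.join_nil, PySem.Chars.lower]
  | cons l t ih =>
    cases t with
    | nil => simp [PySem.Chars.join_singleton]
    | cons m t' =>
      simp only [List.map_cons] at *
      rw [PySem.Chars.join_cons_cons, PySem.Chars.join_cons_cons]
      simp only [PySem.Chars.lower, List.map_append] at *
      rw [ih]
      congr 1

-- a nonempty space-free needle occurs in the " "-join iff it occurs in some part
theorem pv_isIn_join (sub : List Char) (hc : (' ') ∉ sub) (hne : sub ≠ []) :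
    ∀ ls : List (List Char),
      PySem.Chars.isIn sub (PySem.Chars.join [' '] ls) = ls.any (fun l => PySem.Chars.isIn sub l) := by
  intro ls
  induction ls with
  | nil =>
    rw [PySem.Chars.join_nil]
    simp [PySem.Chars.isIn_eq_false_iff, hne]
  | cons l t ih =>
    cases t with
    | nil => simp [PySem.Chars.join_singleton]
    | cons m t' =>
      rw [PySem.Chars.join_cons_cons]
      apply Bool.eq_iff_iff.mpr
      simp only [List.any_cons, PySem.Chars.isIn_iff_infix, Bool.or_eq_true, List.append_assoc,
        List.singleton_append]
      rw [pv_infix_mid sub ' ' hc hne l (PySem.Chars.join [' '] (m :: t'))]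
      have := Bool.eq_iff_iff.mp ih
      simp only [PySem.Chars.isIn_iff_infix, List.any_cons, Bool.or_eq_true] at this
      tauto

-- A's whole-thread keyword test equals Source B's per-message test
theorem pv_keyword_join (k : String) (h1 : (' ') ∉ k.toList) (h2 : k.toList ≠ []) (parts : List String) :
    PySem.Str.isIn k (PySem.Str.lower (PySem.Str.join " " parts))
      = parts.any (fun s => PySem.Str.isIn k (PySem.Str.lower s)) := by
  rw [PySem.Str.isIn_eq, PySem.Str.toList_lower, PySem.Str.toList_join]
  rw [show (" ").toList = [' '] from rfl, pv_lower_join, pv_isIn_join k.toList h1 h2]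
  simp [List.any_map, Function.comp_def, PySem.Str.isIn_eq, PySem.Str.toList_lower]

theorem pv_keywords_ok : ∀ k ∈ pvIssueKeywords ++ pvResolutionKeywords, (' ') ∉ k.toList ∧ k.toList ≠ [] := by
  decide

theorem pv_any_swap {α β : Type} (l : List α) (m : List β) (f : α → β → Bool) :
    l.any (fun a => m.any (fun b => f a b)) = m.any (fun b => l.any (fun a => f a b)) := by
  apply Bool.eq_iff_iff.mpr
  simp only [List.any_eq_true]
  tauto

-- characterisation of Source B's loop from any flag state it can actually reach
theorem pv_altLoop_eq : ∀ (l : List (List (String × String))) (hi hr : Bool), (hi && hr) = false →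
    pvAltLoop l hi hr = ((hi || l.any pvHitI) && (hr || l.any pvHitR)) := by
  have hIdef : ∀ m, (pvIssueKeywords.any fun k => PySem.Str.isIn k (PySem.Str.lower ((PySem.Dict.ofList m).getD "text" ""))) = pvHitI m := fun _ => rfl
  have hRdef : ∀ m, (pvResolutionKeywords.any fun k => PySem.Str.isIn k (PySem.Str.lower ((PySem.Dict.ofList m).getD "text" ""))) = pvHitR m := fun _ => rfl
  intro l
  induction l with
  | nil => intro hi hr h; simp [pvAltLoop, h]
  | cons msg rest ih =>
    intro hi hr _
    simp only [pvAltLoop, List.any_cons]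
    rw [hIdef msg, hRdef msg]
    generalize pvHitI msg = A
    generalize pvHitR msg = B
    cases hi <;> cases hr <;> cases A <;> cases B <;>
      simp [ih false false rfl, ih false true rfl, ih true false rfl]

-- ===== VERDICT (by name: the statement is the Claim_ definition above) =====
theorem is_issue_thread_py_spec : Claim_equal_is_issue_thread_py := by
  intro thread _
  unfold Spec_is_issue_thread_py is_issue_thread_py is_issue_thread_py_alt
  by_cases hl : thread.length < 2
  · simp [hl]
  · simp only [if_neg hl]
    rw [pv_altLoop_eq thread false false rfl]
    simp only [Bool.false_or]
    have hI : pvIssueKeywords.any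
        (fun k => PySem.Str.isIn k (PySem.Str.lower (PySem.Str.join " " (thread.map (fun msg => PySem.Dict.getD (PySem.Dict.ofList msg) "text" "")))))
        = thread.any pvHitI := by
      rw [PySem.List.any_congr_mem (g := fun k => (thread.map (fun msg => PySem.Dict.getD (PySem.Dict.ofList msg) "text" "")).any
            (fun s => PySem.Str.isIn k (PySem.Str.lower s)))
          (fun k hk => pv_keyword_join k
            (pv_keywords_ok k (List.mem_append_left _ hk)).1
            (pv_keywords_ok k (List.mem_append_left _ hk)).2 _)]
      rw [pv_any_swap]
      simp only [List.any_map, Function.comp_def]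
      rfl
    have hR : pvResolutionKeywords.any
        (fun k => PySem.Str.isIn k (PySem.Str.lower (PySem.Str.join " " (thread.map (fun msg => PySem.Dict.getD (PySem.Dict.ofList msg) "text" "")))))
        = thread.any pvHitR := by
      rw [PySem.List.any_congr_mem (g := fun k => (thread.map (fun msg => PySem.Dict.getD (PySem.Dict.ofList msg) "text" "")).any
            (fun s => PySem.Str.isIn k (PySem.Str.lower s)))
          (fun k hk => pv_keyword_join k
            (pv_keywords_ok k (List.mem_append_right _ hk)).1
            (pv_keywords_ok k (List.mem_append_right _ hk)).2 _)]
      rw [pv_any_swap]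
      simp only [List.any_map, Function.comp_def]
      rfl
    rw [hI, hR]
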